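-- pv_equiv track=rewrite | github.com/IvanChen712/Wordle | dewordle/unrepeated_words.py | find_unique_combinations
-- ===== SOURCE A (Python) =====
-- def has_unique_letters(word):
--     return len(set(word)) == len(word)
--
-- def find_unique_combinations(words, combination_length, letters_needed_count):
--     def backtrack(start, path):
--         if len(path) == combination_length:
--             combined_letters = "".join(path)
--             if len(set(combined_letters)) == letters_needed_count:
--                 unique_combinations.append(tuple(path))
--             return
--
--         for i in range(start, len(words)):
--             if has_unique_letters(words[i]):
--                 backtrack(i + 1, path + [words[i]])
--
--     unique_combinations = []
--     backtrack(0, [])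
--
--     return unique_combinations
-- ===== SOURCE B (Python) =====
-- def find_unique_combinations(words, combination_length, letters_needed_count):
--     candidates = [w for w in words if len(set(w)) == len(w)]
--
--     def combos(ws, k):
--         if k == 0:
--             return [()]
--         if not ws:
--             return []
--         first, rest = ws[0], ws[1:]
--         return [(first,) + tail for tail in combos(rest, k - 1)] + combos(rest, k)
--
--     return [c for c in combos(candidates, combination_length)
--             if len({ch for w in c for ch in w}) == letters_needed_count]
-- ===== Notes on version B (the rewrite author's own statement) =====
-- stated objective: alternative
-- what changed: A's index-based nested backtracking (re-testing each word's letter-uniqueness at every recursion node and testing the distinct-letter count at each leaf) is replaced by a one-pass pre-filter of unique-letter words, a structural recursion generating the length-k combinations, and a final comprehension filtering by distinct-letter count.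
import Mathlib
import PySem

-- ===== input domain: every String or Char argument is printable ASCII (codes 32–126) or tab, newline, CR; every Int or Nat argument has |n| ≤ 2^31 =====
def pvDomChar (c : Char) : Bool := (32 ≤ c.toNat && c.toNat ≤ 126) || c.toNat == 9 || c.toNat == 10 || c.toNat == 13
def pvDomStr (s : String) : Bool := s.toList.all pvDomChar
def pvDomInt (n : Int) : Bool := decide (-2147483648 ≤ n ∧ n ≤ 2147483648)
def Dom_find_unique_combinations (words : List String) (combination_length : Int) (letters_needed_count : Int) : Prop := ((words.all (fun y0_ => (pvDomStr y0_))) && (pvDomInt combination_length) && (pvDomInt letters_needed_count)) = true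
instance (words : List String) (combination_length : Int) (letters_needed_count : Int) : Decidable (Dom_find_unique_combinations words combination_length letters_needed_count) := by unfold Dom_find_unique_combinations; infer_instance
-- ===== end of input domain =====

-- B replaces A's index-based backtracking (uniqueness re-checked at every node, distinct-count test at
-- each leaf) by: filter the unique-letter words once, generate the length-k combinations by structural
-- recursion on the list, then filter by distinct-letter count (objective: simpler decomposition).

-- ===== PORT A =====
-- len(set(word)) == len(word)
def has_unique_letters (word : String) : Bool :=
  (PySem.Set.ofList word.toList).length == word.toList.length

mutual
-- the inner 'backtrack(start, path)' of A
def fucBacktrack (words : List String) (combination_length letters_needed_count : Int)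
    (start : Nat) (path : List String) : List (List String) :=
  if (path.length : Int) = combination_length then
    -- combined_letters = "".join(path); len(set(combined_letters)) == letters_needed_count
    (if ((PySem.Set.ofList (PySem.Str.join "" path).toList).length : Int) = letters_needed_count
     then [path] else [])
  else
    fucLoop words combination_length letters_needed_count start path
  termination_by (words.length - start, 1)

-- 'for i in range(start, len(words)): …' of A, appends in recursion order
def fucLoop (words : List String) (combination_length letters_needed_count : Int)
    (i : Nat) (path : List String) : List (List String) :=
  if h : i < words.length then
    (if has_unique_letters words[i] then
       fucBacktrack words combination_length letters_needed_count (i + 1) (path ++ [words[i]])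
     else [])
    ++ fucLoop words combination_length letters_needed_count (i + 1) path
  else []
  termination_by (words.length - i, 0)
end

def find_unique_combinations (words : List String) (combination_length : Int) (letters_needed_count : Int) : List (List String) :=
  fucBacktrack words combination_length letters_needed_count 0 []

-- ===== PORT B =====
-- the inner 'combos(ws, k)' of B
def fucCombos (ws : List String) (k : Int) : List (List String) :=
  if k = 0 then [[]]
  else
    match ws with
    | [] => []
    | first :: rest => (fucCombos rest (k - 1)).map (fun tail => first :: tail) ++ fucCombos rest k

def find_unique_combinations_alt (words : List String) (combination_length : Int) (letters_needed_count : Int) : List (List String) :=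
  let candidates := words.filter (fun w => (PySem.Set.ofList w.toList).length == w.toList.length)
  (fucCombos candidates combination_length).filter
    (fun c => ((PySem.Set.ofList (c.flatMap String.toList)).length : Int) == letters_needed_count)

-- ===== PRECONDITION & SPEC =====
def Spec_find_unique_combinations (words : List String) (combination_length : Int) (letters_needed_count : Int) (out : List (List String)) : Prop := out = find_unique_combinations_alt words combination_length letters_needed_count
instance (words : List String) (combination_length : Int) (letters_needed_count : Int) (out : List (List String)) : Decidable (Spec_find_unique_combinations words combination_length letters_needed_count out) := by unfold Spec_find_unique_combinations; infer_instance

-- ===== CLAIM (what is proved, stated in full; the proofs are below) =====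
def Claim_equal_find_unique_combinations : Prop := ∀ (words : List String) (combination_length : Int) (letters_needed_count : Int), Dom_find_unique_combinations words combination_length letters_needed_count → Spec_find_unique_combinations words combination_length letters_needed_count (find_unique_combinations words combination_length letters_needed_count)

-- ===== LEMMAS AND PROOFS =====

-- "".join(path) has exactly the characters of path, concatenated
theorem pv_join_nil_flat (parts : List (List Char)) : PySem.Chars.join [] parts = parts.flatten := by
  induction parts with
  | nil => simp [PySem.Chars.join_nil]
  | cons h t ih =>
    cases t with
    | nil => simp [PySem.Chars.join_singleton]
    | cons b u => rw [PySem.Chars.join_cons_cons, List.flatten_cons, ← ih]; simp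

theorem pv_toList_join_empty (parts : List String) :
    (PySem.Str.join "" parts).toList = parts.flatMap String.toList := by
  simp [PySem.Str.toList_join, pv_join_nil_flat, List.flatMap_def]

-- B's leaf test, as a predicate
def pvCond (lnc : Int) (c : List String) : Bool :=
  ((PySem.Set.ofList (c.flatMap String.toList)).length : Int) == lnc

-- the value B's machinery assigns to a backtracking node (start index i, current path)
def pvR (words : List String) (cl lnc : Int) (i : Nat) (path : List String) : List (List String) :=
  ((fucCombos ((words.drop i).filter has_unique_letters) (cl - path.length)).map
      (fun c => path ++ c)).filter (pvCond lnc)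

theorem fucCombos_zero (ws : List String) : fucCombos ws 0 = [[]] := by
  rw [fucCombos.eq_def]; simp

theorem fucCombos_nil (k : Int) (hk : k ≠ 0) : fucCombos [] k = [] := by
  rw [fucCombos.eq_def]; simp [hk]

theorem fucCombos_cons (w : String) (ws : List String) (k : Int) (hk : k ≠ 0) :
    fucCombos (w :: ws) k = (fucCombos ws (k - 1)).map (fun tail => w :: tail) ++ fucCombos ws k := by
  rw [fucCombos.eq_def]; simp [hk]

-- leaf: k = 0 means exactly "path has the demanded length"
theorem pvR_leaf (words : List String) (cl lnc : Int) (i : Nat) (path : List String)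
    (h : (path.length : Int) = cl) :
    pvR words cl lnc i path =
      (if ((PySem.Set.ofList (PySem.Str.join "" path).toList).length : Int) = lnc
       then [path] else []) := by
  unfold pvR
  rw [h, sub_self, fucCombos_zero]
  simp only [List.map_cons, List.map_nil, List.append_nil, List.filter_cons, List.filter_nil]
  by_cases hc : ((PySem.Set.ofList (PySem.Str.join "" path).toList).length : Int) = lnc
  · rw [if_pos hc]; rw [pv_toList_join_empty] at hc; simp [pvCond, hc]
  · rw [if_neg hc]; rw [pv_toList_join_empty] at hc; simp [pvCond, hc]

-- main invariant: A's backtrack/loop compute B's value, jointly by induction on the remaining suffix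
theorem pv_main (words : List String) (cl lnc : Int) : ∀ (n : Nat),
    (∀ i path, words.length - i ≤ n →
        fucBacktrack words cl lnc i path = pvR words cl lnc i path) ∧
    (∀ i path, words.length - i ≤ n → (path.length : Int) ≠ cl →
        fucLoop words cl lnc i path = pvR words cl lnc i path) := by
  intro n
  induction n with
  | zero =>
    have loopEq : ∀ i path, words.length - i ≤ 0 → (path.length : Int) ≠ cl →
        fucLoop words cl lnc i path = pvR words cl lnc i path := by
      intro i path hi h
      rw [fucLoop.eq_def]
      have hge : ¬ i < words.length := by omega
      simp only [hge, dif_neg, not_false_iff]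
      unfold pvR
      rw [List.drop_eq_nil_of_le (by omega), List.filter_nil,
          fucCombos_nil _ (by intro hc; exact h (by omega))]
      simp
    constructor
    · intro i path hi
      rw [fucBacktrack.eq_def]
      by_cases h : (path.length : Int) = cl
      · rw [if_pos h, pvR_leaf words cl lnc i path h]
      · rw [if_neg h]; exact loopEq i path hi h
    · exact loopEq
  | succ n ih =>
    have loopEq : ∀ i path, words.length - i ≤ n + 1 → (path.length : Int) ≠ cl →
        fucLoop words cl lnc i path = pvR words cl lnc i path := by
      intro i path hi h
      rw [fucLoop.eq_def]
      by_cases hlt : i < words.length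
      · simp only [hlt, dif_pos]
        have hdrop : words.drop i = words[i] :: words.drop (i + 1) :=
          List.drop_eq_getElem_cons hlt
        have hk : cl - (path.length : Int) ≠ 0 := by intro hc; exact h (by omega)
        by_cases hu : has_unique_letters words[i]
        · have hbt : fucBacktrack words cl lnc (i + 1) (path ++ [words[i]]) =
              pvR words cl lnc (i + 1) (path ++ [words[i]]) :=
            (ih).1 (i + 1) _ (by omega)
          have hlp : fucLoop words cl lnc (i + 1) path = pvR words cl lnc (i + 1) path :=
            (ih).2 (i + 1) path (by omega) h
          rw [hu, if_pos rfl, hbt, hlp]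
          unfold pvR
          rw [hdrop, List.filter_cons_of_pos hu, fucCombos_cons _ _ _ hk]
          rw [List.map_append, List.filter_append, List.map_map]
          congr 1
          have harith : cl - ((path ++ [words[i]]).length : Int) = cl - (path.length : Int) - 1 := by
            simp; omega
          rw [harith]
          congr 1
          apply List.map_congr_left
          intro c _
          simp
        · have hlp : fucLoop words cl lnc (i + 1) path = pvR words cl lnc (i + 1) path :=
            (ih).2 (i + 1) path (by omega) h
          simp only [hu, if_neg, Bool.false_eq_true, not_false_iff, List.nil_append]
          rw [hlp]
          unfold pvR
          rw [hdrop, List.filter_cons_of_neg (by simp [hu])]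
      · simp only [hlt, dif_neg, not_false_iff]
        unfold pvR
        rw [List.drop_eq_nil_of_le (by omega), List.filter_nil, fucCombos_nil _ (by intro hc; exact h (by omega))]
        simp
    constructor
    · intro i path hi
      rw [fucBacktrack.eq_def]
      by_cases h : (path.length : Int) = cl
      · rw [if_pos h, pvR_leaf words cl lnc i path h]
      · rw [if_neg h]; exact loopEq i path hi h
    · exact loopEq

-- ===== VERDICT (by name: the statement is the Claim_ definition above) =====
theorem find_unique_combinations_spec : Claim_equal_find_unique_combinations := by
  intro words cl lnc _
  unfold Spec_find_unique_combinations find_unique_combinations find_unique_combinations_alt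
  rw [(pv_main words cl lnc (words.length)).1 0 [] (by omega)]
  unfold pvR
  have hmap : (fun c : List String => ([] : List String) ++ c) = id := by funext c; simp
  rw [hmap, List.map_id, List.drop_zero]
  norm_num
  rfl
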